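-- pv_equiv track=rewrite | github.com/LinDixuan/CADA | data/pede_dataset.py | split_query
-- ===== SOURCE A (Python) =====
-- def split_query(data_list):
--     ids = []
--     query = []
--     gallery = []
--     for info in data_list:
--         if info[0] in ids:
--             gallery.append(info)
--         else:
--             query.append(info)
--             ids.append(info[0])
--     return query, gallery
-- ===== SOURCE B (Python) =====
-- def split_query(data_list):
--     first_index = {}
--     for i, info in enumerate(data_list):
--         if info[0] not in first_index:
--             first_index[info[0]] = i
--     query = [info for i, info in enumerate(data_list) if first_index[info[0]] == i]
--     gallery = [info for i, info in enumerate(data_list) if first_index[info[0]] != i]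
--     return query, gallery
-- ===== Notes on version B (the rewrite author's own statement) =====
-- stated objective: alternative
-- what changed: Replaces the single accumulating loop with a list-membership scan by a first pass building a dict id->first index followed by two index-keyed filtering passes over enumerate(data_list).
import Mathlib
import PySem

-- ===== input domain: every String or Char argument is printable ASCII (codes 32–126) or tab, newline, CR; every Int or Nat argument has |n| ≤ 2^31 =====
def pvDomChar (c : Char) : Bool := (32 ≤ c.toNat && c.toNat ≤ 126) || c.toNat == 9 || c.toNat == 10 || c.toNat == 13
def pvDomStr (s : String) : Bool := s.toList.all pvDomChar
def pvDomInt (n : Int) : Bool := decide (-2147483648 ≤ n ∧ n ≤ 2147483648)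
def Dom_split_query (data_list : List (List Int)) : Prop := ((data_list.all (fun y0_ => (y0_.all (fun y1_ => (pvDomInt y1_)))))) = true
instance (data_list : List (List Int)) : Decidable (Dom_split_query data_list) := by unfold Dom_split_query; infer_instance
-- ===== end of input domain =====

-- B replaces A's single accumulating loop (list membership on ids) by a first pass
-- building a dict id -> first index, then two index-keyed filtering passes (alternative decomposition).

-- info[0]: Python raises IndexError on an empty inner list; Pre_ excludes those inputs,
-- so inside Pre_ the .getD 0 default is never used.
def keyOf (info : List Int) : Int := (PySem.List.pyGet? info 0).getD 0

-- ===== PORT A =====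
-- the for-loop of A as structural recursion over the same (ids, query, gallery) state
def splitGoA (ids : List Int) (query gallery : List (List Int)) :
    List (List Int) → List (List Int) × List (List Int)
  | [] => (query, gallery)
  | info :: rest =>
    if ids.contains (keyOf info) then splitGoA ids query (gallery ++ [info]) rest
    else splitGoA (ids ++ [keyOf info]) (query ++ [info]) gallery rest

def split_query (data_list : List (List Int)) : List (List Int) × List (List Int) :=
  splitGoA [] [] [] data_list

-- ===== PORT B =====
-- first pass of B: build first_index over enumerate(data_list)
def buildFI (fi : PySem.Dict Int Int) : List (Int × List Int) → PySem.Dict Int Int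
  | [] => fi
  | (i, info) :: rest =>
    if (fi.get? (keyOf info)).isSome then buildFI fi rest
    else buildFI (fi.insert (keyOf info) i) rest

def split_query_alt (data_list : List (List Int)) : List (List Int) × List (List Int) :=
  let en := PySem.List.enumerate data_list
  let fi := buildFI PySem.Dict.empty en
  -- first_index[info[0]] always exists here, so getD's default is never used (Python would KeyError)
  let query := (en.filter (fun p => fi.getD (keyOf p.2) (-1) == p.1)).map Prod.snd
  let gallery := (en.filter (fun p => !(fi.getD (keyOf p.2) (-1) == p.1))).map Prod.snd
  (query, gallery)

-- ===== PRECONDITION & SPEC =====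
-- Pre_ excludes inputs containing an empty inner list, on which the Python A (info[0]) raises IndexError.
def Pre_split_query (data_list : List (List Int)) : Prop := ∀ info ∈ data_list, info ≠ []
instance (data_list : List (List Int)) : Decidable (Pre_split_query data_list) := by unfold Pre_split_query; infer_instance
def pvWitness_split_query : List (List Int) := [[1, 2], [1, 3], [2, 4], [1, 5]]

def Spec_split_query (data_list : List (List Int)) (out : List (List Int) × List (List Int)) : Prop := out = split_query_alt data_list
instance (data_list : List (List Int)) (out : List (List Int) × List (List Int)) : Decidable (Spec_split_query data_list out) := by unfold Spec_split_query; infer_instance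

-- ===== CLAIM (what is proved, stated in full; the proofs are below) =====
def Claim_equal_split_query : Prop := ∀ (data_list : List (List Int)), Dom_split_query data_list → Pre_split_query data_list → Spec_split_query data_list (split_query data_list)

-- ===== LEMMAS AND PROOFS =====

-- buildFI never overwrites: an existing binding survives
theorem buildFI_preserve (l : List (Int × List Int)) (fi : PySem.Dict Int Int)
    (k : Int) (v : Int) (h : fi.get? k = some v) : (buildFI fi l).get? k = some v := by
  induction l generalizing fi with
  | nil => exact h
  | cons p rest ih =>
    obtain ⟨i, info⟩ := p
    simp only [buildFI]
    split
    · exact ih fi h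
    · rename_i hnone
      apply ih
      rw [PySem.Dict.get?_insert]
      split
      · rename_i hk; subst hk; rw [h] at hnone; simp at hnone
      · exact h

-- main invariant lemma: A's loop from state (ids, q, g) equals B's filters over the
-- enumerated suffix, using the dict completed from fi over that suffix.
theorem splitGo_eq (xs : List (List Int)) :
    ∀ (i0 : Int) (ids : List Int) (fi : PySem.Dict Int Int) (q g : List (List Int)),
    (∀ k, (fi.get? k).isSome = ids.contains k) →
    (∀ k v, fi.get? k = some v → v < i0) →
    splitGoA ids q g xs =
      (q ++ ((PySem.List.enumerate xs i0).filter
              (fun p => (buildFI fi (PySem.List.enumerate xs i0)).getD (keyOf p.2) (-1) == p.1)).map Prod.snd,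
       g ++ ((PySem.List.enumerate xs i0).filter
              (fun p => !((buildFI fi (PySem.List.enumerate xs i0)).getD (keyOf p.2) (-1) == p.1))).map Prod.snd) := by
  induction xs with
  | nil => intro i0 ids fi q g _ _; simp [splitGoA, PySem.List.enumerate_nil]
  | cons info rest ih =>
    intro i0 ids fi q g hmem hlt
    rw [PySem.List.enumerate_cons]
    by_cases hin : ids.contains (keyOf info)
    · -- key already seen: gallery branch; fi already has it with value < i0
      have hsome : (fi.get? (keyOf info)).isSome := by rw [hmem]; exact hin
      obtain ⟨v, hv⟩ := Option.isSome_iff_exists.mp hsome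
      have hvlt : v < i0 := hlt _ _ hv
      simp only [splitGoA, hin, if_true, buildFI, hsome, if_true]
      have hfinal : (buildFI fi (PySem.List.enumerate rest (i0 + 1))).get? (keyOf info) = some v :=
        buildFI_preserve _ _ _ _ hv
      have hcond : ((buildFI fi (PySem.List.enumerate rest (i0 + 1))).getD (keyOf info) (-1) == i0) = false := by
        rw [PySem.Dict.getD_eq_get?_getD, hfinal]
        simp; omega
      rw [ih (i0 + 1) ids fi q (g ++ [info]) hmem (fun k v hv => lt_trans (hlt k v hv) (by omega))]
      simp [hcond]
    · -- new key: query branch; fi gains (keyOf info, i0) which survives to the final dict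
      have hnone : (fi.get? (keyOf info)).isSome = false := by rw [hmem]; simpa using hin
      simp only [splitGoA, hin, if_false, buildFI, hnone, Bool.false_eq_true, if_false]
      have hfinal : (buildFI (fi.insert (keyOf info) i0) (PySem.List.enumerate rest (i0 + 1))).get? (keyOf info) = some i0 :=
        buildFI_preserve _ _ _ _ (PySem.Dict.get?_insert_self _ _ _)
      have hcond : ((buildFI (fi.insert (keyOf info) i0) (PySem.List.enumerate rest (i0 + 1))).getD (keyOf info) (-1) == i0) = true := by
        rw [PySem.Dict.getD_eq_get?_getD, hfinal]; simp
      have hmem' : ∀ k, ((fi.insert (keyOf info) i0).get? k).isSome = (ids ++ [keyOf info]).contains k := by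
        intro k
        rw [PySem.Dict.get?_insert]
        split
        · rename_i hk; subst hk; simp
        · rename_i hk; rw [hmem k]; simp
          intro he; exact absurd he hk
      have hlt' : ∀ k v, (fi.insert (keyOf info) i0).get? k = some v → v < i0 + 1 := by
        intro k v hv
        rw [PySem.Dict.get?_insert] at hv
        split at hv
        · injection hv with h; omega
        · exact lt_trans (hlt k v hv) (by omega)
      rw [ih (i0 + 1) (ids ++ [keyOf info]) (fi.insert (keyOf info) i0) (q ++ [info]) g hmem' hlt']
      simp [hcond]

-- ===== VERDICT (by name: the statement is the Claim_ definition above) =====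
theorem split_query_spec : Claim_equal_split_query := by
  intro data_list _ _
  unfold Spec_split_query split_query split_query_alt
  rw [splitGo_eq data_list 0 [] PySem.Dict.empty [] []
      (by intro k; simp [PySem.Dict.get?_empty])
      (by intro k v hv; simp [PySem.Dict.get?_empty] at hv)]
  simp
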